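-- pv_equiv track=rewrite | github.com/ashishk1331/advent-of-code-2015 | Day 1/not_quite_lisp.py | part_one
-- ===== SOURCE A (Python) =====
-- def part_one(text):
-- 	floor = 0
-- 	for i in text:
-- 		if i == '(':
-- 			floor += 1
-- 		else:
-- 			floor -= 1
-- 	return floor
-- ===== SOURCE B (Python) =====
-- def part_one(text):
-- 	return 2 * text.count('(') - len(text)
-- ===== Notes on version B (the rewrite author's own statement) =====
-- stated objective: simpler
-- what changed: Replaces the character-by-character accumulating loop with a closed-form arithmetic expression over the count of opening parentheses and the string length.
import Mathlib
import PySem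

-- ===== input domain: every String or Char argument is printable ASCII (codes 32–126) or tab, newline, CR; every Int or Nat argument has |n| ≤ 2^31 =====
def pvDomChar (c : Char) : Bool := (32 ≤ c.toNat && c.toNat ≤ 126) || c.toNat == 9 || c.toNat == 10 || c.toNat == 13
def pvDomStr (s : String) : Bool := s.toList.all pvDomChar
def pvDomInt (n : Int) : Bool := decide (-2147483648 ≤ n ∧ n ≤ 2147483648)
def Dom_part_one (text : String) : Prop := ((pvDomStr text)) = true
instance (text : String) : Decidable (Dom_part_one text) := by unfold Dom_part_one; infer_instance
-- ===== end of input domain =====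

-- B replaces A's accumulating loop by the closed form 2 * text.count('(') - len(text) (objective: simpler).

-- ===== PORT A =====
def part_one (text : String) : Int :=
  text.toList.foldl (fun floor i => if i == '(' then floor + 1 else floor - 1) 0

-- ===== PORT B =====
def part_one_alt (text : String) : Int :=
  2 * (PySem.Str.count text "(" : Int) - (PySem.Str.len text : Int)

-- ===== PRECONDITION & SPEC =====
def Spec_part_one (text : String) (out : Int) : Prop := out = part_one_alt text
instance (text : String) (out : Int) : Decidable (Spec_part_one text out) := by unfold Spec_part_one; infer_instance

-- ===== CLAIM (what is proved, stated in full; the proofs are below) =====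
def Claim_equal_part_one : Prop := ∀ (text : String), Dom_part_one text → Spec_part_one text (part_one text)

-- ===== LEMMAS AND PROOFS =====

-- A's loop in closed form: each '(' contributes +1, everything else -1.
theorem foldl_floor (l : List Char) : ∀ (a : Int),
    l.foldl (fun floor i => if i == '(' then floor + 1 else floor - 1) a
      = a + 2 * (l.count '(' : Int) - (l.length : Int) := by
  induction l with
  | nil => intro a; simp
  | cons h t ih =>
    intro a
    simp only [List.foldl_cons, List.count_cons, List.length_cons]
    by_cases hc : h = '('
    · simp only [hc, beq_self_eq_true, if_true, ih]; push_cast; ring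
    · rw [if_neg (by simp [hc]), ih]
      rw [if_neg (by simpa using hc)]
      push_cast; ring

-- PySem's substring count specialises to a character count for a one-character needle.
theorem count_go_singleton (c : Char) : ∀ (s : List Char) (fuel acc : Nat), s.length ≤ fuel →
    PySem.Chars.count.go [c] fuel s acc = acc + s.count c := by
  intro s
  induction s with
  | nil => intro fuel acc _; cases fuel <;> simp [PySem.Chars.count.go]
  | cons h t ih =>
    intro fuel acc hf
    cases fuel with
    | zero => simp at hf
    | succ f =>
      have ht : t.length ≤ f := by simpa using hf
      simp only [PySem.Chars.count.go]
      by_cases hc : c = h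
      · subst hc
        rw [List.count_cons]
        simp only [List.isPrefixOf, beq_self_eq_true, Bool.true_and, if_true, List.length_cons]
        simp [ih f (acc+1) ht]
        omega
      · simp [List.isPrefixOf, hc, ih f acc ht, Ne.symm hc]

theorem str_count_paren (text : String) :
    PySem.Str.count text "(" = text.toList.count '(' := by
  simp only [PySem.Str.count_eq]
  show PySem.Chars.count text.toList ['('] = _
  rw [show PySem.Chars.count text.toList ['('] =
        PySem.Chars.count.go ['('] text.toList.length text.toList 0 by
      simp [PySem.Chars.count]]
  simpa using count_go_singleton '(' text.toList text.toList.length 0 le_rfl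

-- ===== VERDICT (by name: the statement is the Claim_ definition above) =====
theorem part_one_spec : Claim_equal_part_one := by
  intro text _
  unfold Spec_part_one part_one part_one_alt
  rw [foldl_floor, str_count_paren]
  simp [PySem.Str.len_eq]
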